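-- pv_equiv track=rewrite | github.com/sunneyxielab/METATAC_pipeline | pyscripts/cleanFq.py | index_extend
-- ===== SOURCE A (Python) =====
-- base = 'ACGTN'
--
-- def index_extend(index_list,extend_list,l):
--     index_dict = dict()
--     blacklist = set()
--     for i in index_list:
--         if len(i) < l:
--             m = l - len(i)
--             for j in extend_list:
--                 index = i + j[0:m]
--                 for k in range(l):
--                     for b in base:
--                         tolerant_index = index[0:k]+b+index[(k+1):]
--                         if tolerant_index not in index_dict:
--                             index_dict[tolerant_index] = i
--                         elif index_dict[tolerant_index] != i:
--                             blacklist.add(tolerant_index)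
--         else:
--             index = i
--             for k in range(len(i)):
--                 for b in base:
--                     tolerant_index = index[0:k]+b+index[(k+1):]
--                     if tolerant_index not in index_dict:
--                         index_dict[tolerant_index] = i
--                     elif index_dict[tolerant_index] != i:
--                         blacklist.add(tolerant_index)
--     for index in blacklist:
--         del(index_dict[index])
--     return(index_dict)
-- ===== SOURCE B (Python) =====
-- base = 'ACGTN'
--
-- def index_extend(index_list, extend_list, l):
--     # Staged algorithm: (1) dedup the sources; (2) compute each distinct
--     # source's ordered variant set; (3) keep a variant iff no OTHER source's
--     # set also contains it -- no streaming owner dict, no blacklist.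
--     def variants(s):
--         if len(s) < l:
--             cands, span = [s + j[0:l - len(s)] for j in extend_list], l
--         else:
--             cands, span = [s], len(s)
--         return list(dict.fromkeys(
--             c[0:k] + b + c[k+1:] for c in cands for k in range(span) for b in base))
--     vsets = [(s, variants(s)) for s in dict.fromkeys(index_list)]
--     result = {}
--     for s, vs in vsets:
--         others = set()
--         for s2, vs2 in vsets:
--             if s2 != s:
--                 others.update(vs2)
--         for v in vs:
--             if v not in others:
--                 result[v] = s
--     return result
-- ===== Notes on version B (the rewrite author's own statement) =====
-- stated objective: alternative
-- what changed: Replaces A's single streaming pass with dict+blacklist conflict bookkeeping by a staged algorithm: dedup the sources, compute each distinct source's ordered variant set once, then keep a variant iff it lies in no other source's set (cross-set exclusion instead of in-loop ownership tracking); not faster, and slower when there are many sources.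
import Mathlib
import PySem

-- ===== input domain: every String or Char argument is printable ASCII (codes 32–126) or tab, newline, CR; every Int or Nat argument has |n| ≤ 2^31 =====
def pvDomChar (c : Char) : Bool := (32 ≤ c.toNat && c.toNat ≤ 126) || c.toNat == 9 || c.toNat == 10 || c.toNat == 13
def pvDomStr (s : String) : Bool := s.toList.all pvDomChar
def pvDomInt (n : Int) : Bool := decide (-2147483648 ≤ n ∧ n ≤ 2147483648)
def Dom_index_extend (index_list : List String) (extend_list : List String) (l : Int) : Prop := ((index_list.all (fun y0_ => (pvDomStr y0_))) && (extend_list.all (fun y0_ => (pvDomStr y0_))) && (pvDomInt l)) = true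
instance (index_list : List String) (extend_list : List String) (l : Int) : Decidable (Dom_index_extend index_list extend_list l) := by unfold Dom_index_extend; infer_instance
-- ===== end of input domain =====

-- B replaces A's streaming dict+blacklist pass by a staged algorithm: dedup the sources,
-- build each distinct source's variant set, keep a variant iff no other source's set has it
-- (objective: alternative; not faster).


-- index[0:k] + b + index[(k+1):]  (identical expression in both Pythons)
def pvVariant (index : List Char) (k : Int) (b : Char) : String :=
  String.ofList (PySem.List.slice index (some 0) (some k) ++ b :: PySem.List.slice index (some (k + 1)) none)

-- ===== PORT A =====
-- one inner-loop body of A: not-in-dict → insert; present with another source → blacklist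
def pvStepA (i : String) (st : PySem.Dict String String × PySem.Set String) (t : String) :
    PySem.Dict String String × PySem.Set String :=
  if st.1.contains t = false then (st.1.insert t i, st.2)
  else if st.1.get? t ≠ some i then (st.1, PySem.Set.add st.2 t)
  else st

def index_extend (index_list : List String) (extend_list : List String) (l : Int) : List (String × String) :=
  let st := index_list.foldl (fun st i =>
    if PySem.Str.len i < l then
      extend_list.foldl (fun st j =>
        let index := i.toList ++ PySem.List.slice j.toList (some 0) (some (l - PySem.Str.len i))
        (PySem.List.pyRange 0 l 1).foldl (fun st k =>
          "ACGTN".toList.foldl (fun st b => pvStepA i st (pvVariant index k b)) st) st) st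
    else
      (PySem.List.pyRange 0 (PySem.Str.len i) 1).foldl (fun st k =>
        "ACGTN".toList.foldl (fun st b => pvStepA i st (pvVariant i.toList k b)) st) st)
    (PySem.Dict.empty, (PySem.Set.empty : PySem.Set String))
  (st.2.foldl (fun d v => d.erase v) st.1).items

-- ===== PORT B =====
-- Source B's `variants(s)`: candidate full strings, all single-substitution strings, deduped in order
def pvVariantsB (extend_list : List String) (l : Int) (s : String) : List String :=
  let cs := if PySem.Str.len s < l then
      (extend_list.map (fun j => s.toList ++ PySem.List.slice j.toList (some 0) (some (l - PySem.Str.len s))), l)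
    else ([s.toList], PySem.Str.len s)
  PySem.List.dedup (cs.1.flatMap (fun c =>
    (PySem.List.pyRange 0 cs.2 1).flatMap (fun k => "ACGTN".toList.map (fun b => pvVariant c k b))))

def index_extend_alt (index_list : List String) (extend_list : List String) (l : Int) : List (String × String) :=
  let vsets := (PySem.List.dedup index_list).map (fun s => (s, pvVariantsB extend_list l s))
  (vsets.foldl (fun res p =>
      let others := vsets.foldl (fun o q => if q.1 ≠ p.1 then PySem.Set.update o q.2 else o)
        (PySem.Set.empty : PySem.Set String)
      p.2.foldl (fun res v =>
        if !(PySem.Set.contains others v) then res.insert v p.1 else res) res)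
    (PySem.Dict.empty : PySem.Dict String String)).items

-- ===== PRECONDITION & SPEC =====
def Spec_index_extend (index_list : List String) (extend_list : List String) (l : Int) (out : List (String × String)) : Prop := out = index_extend_alt index_list extend_list l
instance (index_list : List String) (extend_list : List String) (l : Int) (out : List (String × String)) : Decidable (Spec_index_extend index_list extend_list l out) := by unfold Spec_index_extend; infer_instance

-- ===== CLAIM (what is proved, stated in full; the proofs are below) =====
def Claim_equal_index_extend : Prop := ∀ (index_list : List String) (extend_list : List String) (l : Int), Dom_index_extend index_list extend_list l → Spec_index_extend index_list extend_list l (index_extend index_list extend_list l)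

-- ===== LEMMAS AND PROOFS =====

-- the per-source candidate full-length strings and mutation span
def pvCands (extend_list : List String) (l : Int) (i : String) : List (List Char) :=
  if PySem.Str.len i < l then
    extend_list.map (fun j => i.toList ++ PySem.List.slice j.toList (some 0) (some (l - PySem.Str.len i)))
  else [i.toList]

def pvSpan (l : Int) (i : String) : Int :=
  if PySem.Str.len i < l then l else PySem.Str.len i

-- the raw (duplicate-carrying) variant stream of one source, in generation order
def pvRawVar (extend_list : List String) (l : Int) (i : String) : List String :=
  (pvCands extend_list l i).flatMap (fun c =>
    (PySem.List.pyRange 0 (pvSpan l i) 1).flatMap (fun k => "ACGTN".toList.map (fun b => pvVariant c k b)))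

-- the common stream of (variant, source) pairs A processes, in order
def pvPairs (index_list : List String) (extend_list : List String) (l : Int) : List (String × String) :=
  index_list.flatMap (fun i => (pvRawVar extend_list l i).map (fun v => (v, i)))

-- distinct variants in first-appearance order, and the set of sources producing a variant
def pvKeys (ps : List (String × String)) : List String := PySem.Set.ofList (ps.map Prod.fst)
def pvSSet (ps : List (String × String)) (v : String) : PySem.Set String :=
  PySem.Set.ofList ((ps.filter (fun p => p.1 == v)).map Prod.snd)

-- "variant v survives" (exactly one distinct source produces it)
def pvP (index_list extend_list : List String) (l : Int) (v : String) : Bool :=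
  (pvSSet (pvPairs index_list extend_list l) v).length == 1

-- the canonical form both programs are reduced to
def pvC (index_list extend_list : List String) (l : Int) : List (String × String) :=
  (PySem.Set.ofList index_list).flatMap (fun s =>
    ((PySem.Set.ofList (pvRawVar extend_list l s)).filter (pvP index_list extend_list l)).map
      (fun v => (v, s)))

-- ---------- generic list/set toolkit ----------

lemma pv_discard_eq (s : List String) (x : String) :
    PySem.Set.discard s x = s.filter (fun y => !(y == x)) := rfl

lemma pv_foldl_flatMap {α β γ : Type} (xs : List α) (f : α → List β) (g : γ → β → γ) (init : γ) :
    (xs.flatMap f).foldl g init = xs.foldl (fun a x => (f x).foldl g a) init := by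
  induction xs generalizing init with
  | nil => rfl
  | cons x xs ih => simp [List.flatMap_cons, List.foldl_append, ih]

lemma pv_filter_flatMap {α β : Type} (xs : List α) (f : α → List β) (p : β → Bool) :
    (xs.flatMap f).filter p = xs.flatMap (fun x => (f x).filter p) := by
  induction xs with
  | nil => rfl
  | cons x xs ih => simp [List.flatMap_cons, List.filter_append, ih]

lemma pv_map_flatMap {α β γ : Type} (xs : List α) (f : α → List β) (g : β → γ) :
    (xs.flatMap f).map g = xs.flatMap (fun x => (f x).map g) := by
  induction xs with
  | nil => rfl
  | cons x xs ih => simp [List.flatMap_cons, ih]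

lemma pv_flatMap_congr_filter {α β : Type} (L : List α) (F G : α → List β) (p : α → Bool)
    (hT : ∀ y ∈ L, p y = true → F y = G y) (hF : ∀ y ∈ L, p y = false → F y = []) :
    L.flatMap F = (L.filter p).flatMap G := by
  induction L with
  | nil => rfl
  | cons y L ih =>
    rw [List.flatMap_cons, List.filter_cons]
    by_cases h : p y = true
    · rw [if_pos h, List.flatMap_cons, hT y (List.mem_cons_self) h,
        ih (fun z hz => hT z (List.mem_cons_of_mem _ hz)) (fun z hz => hF z (List.mem_cons_of_mem _ hz))]
    · rw [if_neg h, hF y (List.mem_cons_self) (Bool.not_eq_true _ ▸ (by simpa using h)),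
        ih (fun z hz => hT z (List.mem_cons_of_mem _ hz)) (fun z hz => hF z (List.mem_cons_of_mem _ hz))]
      simp

lemma pv_all_eq_singleton (L : List String) (s : String) (hn : L.Nodup) (hm : s ∈ L)
    (hall : ∀ t ∈ L, t = s) : L = [s] := by
  cases L with
  | nil => simp at hm
  | cons a t =>
    have has : a = s := hall a (List.mem_cons_self)
    have ht : t = [] := by
      rw [List.eq_nil_iff_forall_not_mem]
      intro u hu
      have := hall u (List.mem_cons_of_mem _ hu)
      rw [List.nodup_cons] at hn
      exact hn.1 (by rw [has, ← this]; exact hu)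
    rw [has, ht]

lemma pv_two_mem_length_ne_one (L : List String) (x y : String) (hx : x ∈ L) (hy : y ∈ L)
    (hxy : x ≠ y) : L.length ≠ 1 := by
  intro h
  obtain ⟨a, ha⟩ := List.length_eq_one_iff.mp h
  subst ha
  simp at hx hy
  exact hxy (hx.trans hy.symm)

-- dedup commutes with filter
lemma pv_ofList_filter (p : String → Bool) (xs : List String) :
    PySem.Set.ofList (xs.filter p) = (PySem.Set.ofList xs).filter p := by
  induction xs with
  | nil => rfl
  | cons x xs ih =>
    rw [List.filter_cons, PySem.Set.ofList_cons, pv_discard_eq, List.filter_cons]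
    by_cases h : p x = true
    · rw [if_pos h, if_pos h, PySem.Set.ofList_cons, pv_discard_eq, ih,
        List.filter_filter, List.filter_filter]
      congr 1
      apply List.filter_congr
      intro y _
      simp [Bool.and_comm]
    · have hx : p x = false := by simpa using h
      rw [if_neg h, if_neg h, ih, List.filter_filter]
      apply (List.filter_congr _).symm
      intro y _
      by_cases hyx : y = x
      · subst hyx; simp [hx]
      · simp [hyx]

-- ofList over a replicate-prefixed list
lemma pv_ofList_replicate_append (n : Nat) (x : String) (L : List String) :
    PySem.Set.ofList (List.replicate n x ++ L)
    = if n = 0 then PySem.Set.ofList L else x :: PySem.Set.discard (PySem.Set.ofList L) x := by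
  induction n with
  | zero => simp
  | succ n ih =>
    rw [List.replicate_succ, List.cons_append, PySem.Set.ofList_cons, ih]
    by_cases h : n = 0
    · simp [h]
    · rw [if_neg h, if_neg (Nat.succ_ne_zero n)]
      congr 1
      rw [pv_discard_eq, pv_discard_eq, List.filter_cons]
      simp [List.filter_filter]

-- dedup of disjoint blocks = blocks of the deduped sources, deduped blockwise
lemma pv_ofList_flatMap_disjoint (h : String → List String) (xs : List String)
    (hd : ∀ x ∈ xs, ∀ y ∈ xs, x ≠ y → ∀ v, v ∈ h x → v ∉ h y) :
    PySem.Set.ofList (xs.flatMap h)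
    = (PySem.Set.ofList xs).flatMap (fun x => PySem.Set.ofList (h x)) := by
  induction xs with
  | nil => rfl
  | cons x rest ih =>
    have hd' : ∀ a ∈ rest, ∀ b ∈ rest, a ≠ b → ∀ v, v ∈ h a → v ∉ h b :=
      fun a ha b hb => hd a (List.mem_cons_of_mem _ ha) b (List.mem_cons_of_mem _ hb)
    rw [List.flatMap_cons, PySem.Set.ofList_append, PySem.Set.update_eq_append_filter,
      ih hd', PySem.Set.ofList_cons, List.flatMap_cons]
    congr 1
    rw [pv_filter_flatMap, pv_discard_eq]
    apply pv_flatMap_congr_filter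
    · intro y hy hyx
      have hyr : y ∈ rest := by
        have := (PySem.Set.mem_ofList _ _).mp hy
        exact this
      have hyx' : y ≠ x := by simpa using hyx
      apply List.filter_eq_self.mpr
      intro w hw
      have hwy : w ∈ h y := (PySem.Set.mem_ofList _ _).mp hw
      have hwx : w ∉ h x :=
        hd y (List.mem_cons_of_mem _ hyr) x (List.mem_cons_self) hyx' w hwy
      have hcf : PySem.Set.contains (PySem.Set.ofList (h x)) w = false :=
        Bool.eq_false_iff.mpr (fun hc =>
          hwx ((PySem.Set.mem_ofList _ _).mp ((PySem.Set.contains_iff _ _).mp hc)))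
      simpa [hcf] using hwx
    · intro y hy hyx
      have hyx' : y = x := by simpa using hyx
      subst hyx'
      apply List.filter_eq_nil_iff.mpr
      intro w hw
      have hwx : w ∈ h y := (PySem.Set.mem_ofList _ _).mp hw
      have hct : PySem.Set.contains (PySem.Set.ofList (h y)) w = true :=
        (PySem.Set.contains_iff _ _).mpr ((PySem.Set.mem_ofList _ _).mpr hwx)
      simpa [hct] using hwx

-- ---------- the variant stream and its per-variant source set ----------

lemma pv_block_snd (gi : List String) (i v : String) :
    (((gi.map (fun w => (w, i))).filter (fun q => q.1 == v)).map Prod.snd)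
    = List.replicate (gi.count v) i := by
  rw [List.filter_map, List.map_map]
  have h1 : (fun (q : String × String) => q.1 == v) ∘ (fun w => (w, i)) = (fun w => w == v) := rfl
  rw [h1, List.filter_beq, List.map_replicate]
  rfl

lemma pv_sset_closed (extend_list : List String) (l : Int) (v : String) (index_list : List String) :
    pvSSet (pvPairs index_list extend_list l) v
    = PySem.Set.ofList (index_list.filter (fun i => (pvRawVar extend_list l i).contains v)) := by
  induction index_list with
  | nil => rfl
  | cons i rest ih =>
    have hps : pvPairs (i :: rest) extend_list l
        = (pvRawVar extend_list l i).map (fun w => (w, i)) ++ pvPairs rest extend_list l := by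
      simp [pvPairs]
    rw [hps]
    unfold pvSSet
    rw [List.filter_append, List.map_append, pv_block_snd, pv_ofList_replicate_append,
      List.filter_cons]
    by_cases h : v ∈ pvRawVar extend_list l i
    · have hc : (pvRawVar extend_list l i).contains v = true := by
        simpa [List.contains_iff_mem] using h
      have hn : (pvRawVar extend_list l i).count v ≠ 0 := by
        simpa [List.count_eq_zero] using h
      rw [if_neg hn, if_pos (by simpa using hc), PySem.Set.ofList_cons]
      unfold pvSSet at ih
      rw [ih]
    · have hc : ((pvRawVar extend_list l i).contains v) = false := by
        simpa [List.contains_iff_mem] using h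
      have hn : (pvRawVar extend_list l i).count v = 0 := List.count_eq_zero.mpr h
      rw [if_pos hn, if_neg (by simpa using h)]
      unfold pvSSet at ih
      rw [ih]

lemma pv_keys_closed (index_list extend_list : List String) (l : Int) :
    pvKeys (pvPairs index_list extend_list l)
    = PySem.Set.ofList (index_list.flatMap (pvRawVar extend_list l)) := by
  unfold pvKeys pvPairs
  rw [pv_map_flatMap]
  congr 1
  apply List.flatMap_congr
  intro x _
  simp [Function.comp_def]

-- variants of Source B = dedup of the raw stream
lemma pv_variantsB_eq (extend_list : List String) (l : Int) (s : String) :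
    pvVariantsB extend_list l s = PySem.Set.ofList (pvRawVar extend_list l s) := by
  unfold pvVariantsB pvRawVar pvCands pvSpan
  by_cases h : PySem.Str.len s < l
  · simp only [if_pos h, PySem.List.dedup_eq_ofList]
  · simp only [if_neg h, PySem.List.dedup_eq_ofList]

-- v has exactly one distinct source iff its source set is [s], for any s producing v
lemma pv_sset_mem (index_list extend_list : List String) (l : Int) (v s : String)
    (hs : s ∈ index_list) (hv : v ∈ pvRawVar extend_list l s) :
    s ∈ pvSSet (pvPairs index_list extend_list l) v := by
  rw [pv_sset_closed]
  rw [PySem.Set.mem_ofList, List.mem_filter]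
  exact ⟨hs, by simpa [List.contains_iff_mem] using hv⟩

lemma pv_sset_nodup (index_list extend_list : List String) (l : Int) (v : String) :
    (pvSSet (pvPairs index_list extend_list l) v).Nodup := by
  rw [pv_sset_closed]; exact PySem.Set.nodup_ofList _

lemma pv_surv_singleton (index_list extend_list : List String) (l : Int) (v s : String)
    (hs : s ∈ index_list) (hv : v ∈ pvRawVar extend_list l s)
    (hP : pvP index_list extend_list l v = true) :
    pvSSet (pvPairs index_list extend_list l) v = [s] := by
  have hlen : (pvSSet (pvPairs index_list extend_list l) v).length = 1 := by
    simpa [pvP] using hP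
  obtain ⟨a, ha⟩ := List.length_eq_one_iff.mp hlen
  have hm := pv_sset_mem index_list extend_list l v s hs hv
  rw [ha] at hm ⊢
  simp at hm
  rw [hm]

-- two distinct sources both producing v kill pvP
lemma pv_not_surv (index_list extend_list : List String) (l : Int) (v x y : String)
    (hx : x ∈ index_list) (hy : y ∈ index_list) (hxy : x ≠ y)
    (hvx : v ∈ pvRawVar extend_list l x) (hvy : v ∈ pvRawVar extend_list l y) :
    pvP index_list extend_list l v = false := by
  have h1 := pv_sset_mem index_list extend_list l v x hx hvx
  have h2 := pv_sset_mem index_list extend_list l v y hy hvy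
  have := pv_two_mem_length_ne_one _ x y h1 h2 hxy
  simp [pvP, this]

-- ---------- A side: closed form of A's dict and blacklist ----------

lemma pv_headD_add (s : PySem.Set String) (x : String) (d : String) (h : s ≠ []) :
    (PySem.Set.add s x).headD d = s.headD d := by
  simp only [PySem.Set.add]; split
  · rfl
  · cases s with
    | nil => simp at h
    | cons a t => simp

lemma pv_headD_mem (s : PySem.Set String) (d : String) (h : s ≠ []) : s.headD d ∈ s := by
  cases s with
  | nil => simp at h
  | cons a t => simp

lemma pv_one_lt_add (s : PySem.Set String) (x : String) (h : s ≠ []) (h2 : s.headD "" ≠ x) :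
    1 < (PySem.Set.add s x).length := by
  simp only [PySem.Set.add]; split
  · rename_i hc
    have hx : x ∈ s := by simpa using hc
    cases s with
    | nil => simp at h
    | cons a t =>
      simp only [List.headD_cons] at h2
      have hxt : x ∈ t := by
        rcases List.mem_cons.mp hx with h' | h'
        · exact absurd h'.symm h2
        · exact h'
      have := List.length_pos_of_mem hxt
      simp only [List.length_cons]; omega
  · cases s with
    | nil => simp at h
    | cons a t => simp

lemma pv_mem_keys_iff (ps : List (String × String)) (v : String) :
    v ∈ pvKeys ps ↔ pvSSet ps v ≠ [] := by
  unfold pvKeys pvSSet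
  rw [Ne, List.eq_nil_iff_forall_not_mem]
  simp [PySem.Set.mem_ofList, List.mem_filter]

lemma pv_sset_nil_of_not_mem (ps : List (String × String)) (v : String) (h : v ∉ pvKeys ps) :
    pvSSet ps v = [] := by
  by_contra hne
  exact h ((pv_mem_keys_iff ps v).mpr hne)

lemma pvKeys_append (ps : List (String × String)) (p : String × String) :
    pvKeys (ps ++ [p]) = PySem.Set.add (pvKeys ps) p.1 := by
  unfold pvKeys
  rw [List.map_append, show List.map Prod.fst [p] = [p.1] from rfl,
    PySem.Set.ofList_append_singleton]

lemma pvSSet_append_self (ps : List (String × String)) (p : String × String) :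
    pvSSet (ps ++ [p]) p.1 = PySem.Set.add (pvSSet ps p.1) p.2 := by
  unfold pvSSet
  rw [List.filter_append, show List.filter (fun q => q.1 == p.1) [p] = [p] by simp,
    List.map_append, show List.map Prod.snd [p] = [p.2] from rfl,
    PySem.Set.ofList_append_singleton]

lemma pvSSet_append_ne (ps : List (String × String)) (p : String × String) (v : String)
    (h : v ≠ p.1) : pvSSet (ps ++ [p]) v = pvSSet ps v := by
  unfold pvSSet
  rw [List.filter_append, show List.filter (fun q => q.1 == v) [p] = [] by simp [Ne.symm h],
    List.append_nil]

-- a dict whose items list is keys.map (fun v => (v, g v)) with Nodup keys: lookups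
lemma pv_dict_shape {ν : Type} (d : PySem.Dict String ν) (keys : List String) (g : String → ν)
    (h : d.items = keys.map fun v => (v, g v)) (hnd : keys.Nodup) :
    (∀ t, d.contains t = keys.contains t) ∧ (∀ t ∈ keys, d.get? t = some (g t)) := by
  constructor
  · intro t
    show d.items.any (fun p => p.1 == t) = _
    rw [h, List.any_map]
    rw [show ((fun (p : String × ν) => p.1 == t) ∘ fun v => (v, g v)) = (fun v => v == t) from rfl]
    exact List.any_beq'
  · intro t ht
    apply PySem.Dict.get?_of_mem_items
    · rw [h]; exact List.mem_map_of_mem ht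
    · show (d.items.map Prod.fst).Nodup
      rw [h, List.map_map,
        show (Prod.fst ∘ fun v => (v, g v)) = id from rfl, List.map_id]
      exact hnd

lemma pv_nodup_keys (ps : List (String × String)) : (pvKeys ps).Nodup :=
  PySem.Set.nodup_ofList _

-- A's nested loops are the fold of pvStepA over the pair stream
lemma pvA_fold (index_list extend_list : List String) (l : Int)
    (init : PySem.Dict String String × PySem.Set String) :
    (index_list.foldl (fun st i =>
      if PySem.Str.len i < l then
        extend_list.foldl (fun st j =>
          let index := i.toList ++ PySem.List.slice j.toList (some 0) (some (l - PySem.Str.len i))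
          (PySem.List.pyRange 0 l 1).foldl (fun st k =>
            "ACGTN".toList.foldl (fun st b => pvStepA i st (pvVariant index k b)) st) st) st
      else
        (PySem.List.pyRange 0 (PySem.Str.len i) 1).foldl (fun st k =>
          "ACGTN".toList.foldl (fun st b => pvStepA i st (pvVariant i.toList k b)) st) st) init)
    = (pvPairs index_list extend_list l).foldl (fun st p => pvStepA p.2 st p.1) init := by
  induction index_list generalizing init with
  | nil => rfl
  | cons i rest ih =>
    rw [show pvPairs (i :: rest) extend_list l
        = ((pvRawVar extend_list l i).map (fun v => (v, i))) ++ pvPairs rest extend_list l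
        from by simp [pvPairs]]
    rw [List.foldl_cons, ih, List.foldl_append]
    congr 1
    rw [List.foldl_map]
    unfold pvRawVar
    by_cases h : PySem.Str.len i < l
    · simp only [if_pos h, pvCands, pvSpan, pv_foldl_flatMap, List.foldl_map]
    · simp only [if_neg h, pvCands, pvSpan, pv_foldl_flatMap, List.foldl_map,
        List.flatMap_cons, List.flatMap_nil, List.append_nil]

-- A's dict ignores the blacklist and never overwrites: closed form of its items
lemma pvA_items (ps : List (String × String)) :
    ((ps.foldl (fun st p => pvStepA p.2 st p.1) (PySem.Dict.empty, PySem.Set.empty)).1).items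
    = (pvKeys ps).map (fun v => (v, (pvSSet ps v).headD "")) := by
  induction ps using List.reverseRecOn with
  | nil => simp [pvKeys, PySem.Dict.empty]
  | append_singleton ps p ih =>
    rw [List.foldl_append, List.foldl_cons, List.foldl_nil]
    set st := ps.foldl (fun st p => pvStepA p.2 st p.1) (PySem.Dict.empty, PySem.Set.empty) with hst
    obtain ⟨hcont, hget⟩ := pv_dict_shape _ _ _ ih (pv_nodup_keys ps)
    by_cases hm : p.1 ∈ pvKeys ps
    · have hc : st.1.contains p.1 = true := by rw [hcont]; exact List.elem_eq_true_of_mem hm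
      have hfst : (pvStepA p.2 st p.1).1 = st.1 := by
        unfold pvStepA
        rw [if_neg (by simp [hc])]
        split <;> rfl
      rw [hfst, ih, pvKeys_append, PySem.Set.add_of_mem hm]
      apply List.map_congr_left
      intro v hv
      by_cases hvp : v = p.1
      · subst hvp
        rw [pvSSet_append_self,
          pv_headD_add _ _ _ ((pv_mem_keys_iff ps p.1).mp hm)]
      · rw [pvSSet_append_ne ps p v hvp]
    · have hc : st.1.contains p.1 = false := by
        rw [hcont]
        exact (Bool.not_eq_true _).mp (fun hh => hm (List.mem_of_elem_eq_true hh))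
      have hfst : (pvStepA p.2 st p.1).1 = st.1.insert p.1 p.2 := by
        unfold pvStepA
        rw [if_pos hc]
      rw [hfst, PySem.Dict.items_insert_of_not_contains _ _ hc, ih,
        pvKeys_append, PySem.Set.add_of_not_mem hm, List.map_append]
      congr 1
      · apply List.map_congr_left
        intro v hv
        have hvp : v ≠ p.1 := fun he => hm (he ▸ hv)
        rw [pvSSet_append_ne ps p v hvp]
      · rw [show List.map (fun v => (v, List.headD (pvSSet (ps ++ [p]) v) "")) [p.1]
            = [(p.1, List.headD (pvSSet (ps ++ [p]) p.1) "")] from rfl,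
          pvSSet_append_self, pv_sset_nil_of_not_mem ps p.1 hm]
        rfl

-- closed form of A's blacklist membership
lemma pvA_bl (ps : List (String × String)) (v : String) :
    v ∈ (ps.foldl (fun st p => pvStepA p.2 st p.1) (PySem.Dict.empty, PySem.Set.empty)).2
    ↔ 1 < (pvSSet ps v).length := by
  induction ps using List.reverseRecOn with
  | nil => simp [pvSSet, PySem.Set.empty]
  | append_singleton ps p ih =>
    rw [List.foldl_append, List.foldl_cons, List.foldl_nil]
    set st := ps.foldl (fun st p => pvStepA p.2 st p.1) (PySem.Dict.empty, PySem.Set.empty) with hst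
    obtain ⟨hcont, hget⟩ := pv_dict_shape _ _ _ (pvA_items ps) (pv_nodup_keys ps)
    by_cases hm : p.1 ∈ pvKeys ps
    · have hc : st.1.contains p.1 = true := by rw [hcont]; exact List.elem_eq_true_of_mem hm
      have hne : pvSSet ps p.1 ≠ [] := (pv_mem_keys_iff ps p.1).mp hm
      have hgv : st.1.get? p.1 = some ((pvSSet ps p.1).headD "") := hget p.1 hm
      unfold pvStepA
      rw [if_neg (by simp [hc])]
      by_cases heq : (pvSSet ps p.1).headD "" = p.2
      · rw [if_neg (by rw [hgv, heq]; simp)]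
        by_cases hvp : v = p.1
        · subst hvp
          rw [ih, pvSSet_append_self,
            PySem.Set.add_of_mem (heq ▸ pv_headD_mem _ "" hne)]
        · rw [ih, pvSSet_append_ne ps p v hvp]
      · rw [if_pos (by rw [hgv]; simpa using heq)]
        show v ∈ PySem.Set.add st.2 p.1 ↔ _
        rw [PySem.Set.mem_add]
        by_cases hvp : v = p.1
        · subst hvp
          rw [pvSSet_append_self]
          simp only [or_true, true_iff]
          exact pv_one_lt_add _ _ hne heq
        · rw [pvSSet_append_ne ps p v hvp]
          simp [hvp, ih]
    · have hc : st.1.contains p.1 = false := by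
        rw [hcont]
        exact (Bool.not_eq_true _).mp (fun hh => hm (List.mem_of_elem_eq_true hh))
      unfold pvStepA
      rw [if_pos hc]
      by_cases hvp : v = p.1
      · subst hvp
        rw [ih, pvSSet_append_self, pv_sset_nil_of_not_mem ps p.1 hm]
        simp [PySem.Set.add]
      · rw [ih, pvSSet_append_ne ps p v hvp]

-- deleting every blacklisted key filters the items list
lemma pv_erase_fold {ν : Type} (bl : List String) (d : PySem.Dict String ν) :
    (bl.foldl (fun d v => d.erase v) d).items
    = d.items.filter (fun p => !(bl.contains p.1)) := by
  induction bl generalizing d with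
  | nil => simp
  | cons v bl ih =>
    rw [List.foldl_cons, ih]
    simp only [PySem.Dict.erase, List.filter_filter]
    apply List.filter_congr
    intro p _
    by_cases h : p.1 = v <;> simp [h]

-- A reduced: surviving variants, in first-appearance order, with their unique source's head
lemma pvA_closed (index_list extend_list : List String) (l : Int) :
    index_extend index_list extend_list l
    = ((pvKeys (pvPairs index_list extend_list l)).filter (pvP index_list extend_list l)).map
        (fun v => (v, (pvSSet (pvPairs index_list extend_list l) v).headD "")) := by
  simp only [index_extend]
  rw [pvA_fold, pv_erase_fold, pvA_items]
  set ps := pvPairs index_list extend_list l with hps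
  set bl := (ps.foldl (fun st p => pvStepA p.2 st p.1) (PySem.Dict.empty, PySem.Set.empty)).2 with hbl
  rw [List.filter_map]
  congr 1
  apply List.filter_congr
  intro v hv
  have h1 := pvA_bl ps v
  rw [← hbl] at h1
  have h2 : 0 < (pvSSet ps v).length :=
    List.length_pos_of_ne_nil ((pv_mem_keys_iff ps v).mp hv)
  simp only [Function.comp_apply]
  by_cases hmb : v ∈ bl
  · have h3 := h1.mp hmb
    have hcv : List.contains bl v = true := by simpa [List.contains_iff_mem] using hmb
    rw [hcv]
    simp only [Bool.not_true]
    have : pvP index_list extend_list l v = false := by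
      simp only [pvP, ← hps, beq_eq_false_iff_ne, Ne]
      omega
    rw [this]
  · have h3 : ¬ 1 < (pvSSet ps v).length := fun hh => hmb (h1.mpr hh)
    have hcv : List.contains bl v = false :=
      (Bool.not_eq_true _).mp (fun hh => hmb (List.mem_of_elem_eq_true hh))
    rw [hcv]
    simp only [Bool.not_false]
    have : pvP index_list extend_list l v = true := by
      simp only [pvP, ← hps, beq_iff_eq]
      omega
    rw [this]

-- A equals the canonical staged form
lemma pvA_eq_C (index_list extend_list : List String) (l : Int) :
    index_extend index_list extend_list l = pvC index_list extend_list l := by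
  rw [pvA_closed, pv_keys_closed, ← pv_ofList_filter,
    pv_filter_flatMap,
    pv_ofList_flatMap_disjoint _ index_list (by
      intro x hx y hy hxy v hvx hvy
      rw [List.mem_filter] at hvx hvy
      have := pv_not_surv index_list extend_list l v x y hx hy hxy hvx.1 hvy.1
      rw [this] at hvx
      exact absurd hvx.2 (by simp)),
    pv_map_flatMap]
  unfold pvC
  apply List.flatMap_congr ?_
  intro s hs
  have hsil : s ∈ index_list := (PySem.Set.mem_ofList _ _).mp hs
  rw [pv_ofList_filter]
  apply List.map_congr_left
  intro v hv
  rw [List.mem_filter] at hv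
  have hvg : v ∈ pvRawVar extend_list l s := (PySem.Set.mem_ofList _ _).mp hv.1
  rw [pv_surv_singleton index_list extend_list l v s hsil hvg hv.2]
  rfl

-- ---------- B side ----------

-- membership in Source B's `others` set for source s
lemma pv_mem_others (vsets : List (String × List String)) (s v : String)
    (init : PySem.Set String) :
    v ∈ vsets.foldl (fun o q => if q.1 ≠ s then PySem.Set.update o q.2 else o) init
    ↔ v ∈ init ∨ ∃ q ∈ vsets, q.1 ≠ s ∧ v ∈ q.2 := by
  induction vsets generalizing init with
  | nil => simp
  | cons q rest ih =>
    rw [List.foldl_cons]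
    by_cases h : q.1 ≠ s
    · rw [if_pos h, ih, PySem.Set.mem_update]
      constructor
      · rintro (⟨h1 | h1⟩ | ⟨r, hr, hr1, hr2⟩)
        · exact Or.inl h1
        · exact Or.inr ⟨q, List.mem_cons_self, h, h1⟩
        · exact Or.inr ⟨r, List.mem_cons_of_mem _ hr, hr1, hr2⟩
      · rintro (h1 | ⟨r, hr, hr1, hr2⟩)
        · exact Or.inl (Or.inl h1)
        · rcases List.mem_cons.mp hr with he | he
          · subst he; exact Or.inl (Or.inr hr2)
          · exact Or.inr ⟨r, he, hr1, hr2⟩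
    · rw [if_neg h, ih]
      constructor
      · rintro (h1 | ⟨r, hr, hr1, hr2⟩)
        · exact Or.inl h1
        · exact Or.inr ⟨r, List.mem_cons_of_mem _ hr, hr1, hr2⟩
      · rintro (h1 | ⟨r, hr, hr1, hr2⟩)
        · exact Or.inl h1
        · rcases List.mem_cons.mp hr with he | he
          · subst he; exact absurd hr1 (by simpa using h)
          · exact Or.inr ⟨r, he, hr1, hr2⟩

-- a guarded fold is a fold over the filtered list
lemma pv_foldl_if_filter {α γ : Type} (p : α → Bool) (g : γ → α → γ) (xs : List α) (init : γ) :
    xs.foldl (fun r v => if p v then g r v else r) init = (xs.filter p).foldl g init := by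
  induction xs generalizing init with
  | nil => rfl
  | cons x xs ih =>
    rw [List.foldl_cons, List.filter_cons]
    by_cases h : p x = true
    · rw [if_pos h, if_pos h, List.foldl_cons, ih]
    · rw [if_neg h, if_neg (by simpa using h), ih]

-- folding fresh inserts from the empty dict yields exactly the pair list
lemma pv_items_foldl_insert (pairs : List (String × String))
    (hnd : (pairs.map Prod.fst).Nodup) :
    ((pairs.foldl (fun r q => r.insert q.1 q.2) PySem.Dict.empty).items) = pairs := by
  induction pairs using List.reverseRecOn with
  | nil => simp [PySem.Dict.empty]
  | append_singleton ps p ih =>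
    rw [List.map_append] at hnd
    have hnd' : (ps.map Prod.fst).Nodup := (List.nodup_append.mp hnd).1
    have hnotin : p.1 ∉ ps.map Prod.fst := by
      intro hmem
      exact (List.nodup_append.mp hnd).2.2 p.1 hmem p.1 (by simp) rfl
    rw [List.foldl_append, List.foldl_cons, List.foldl_nil]
    set d := ps.foldl (fun r q => r.insert q.1 q.2) PySem.Dict.empty with hd
    have hc : d.contains p.1 = false := by
      show (d.items.any (fun q => q.1 == p.1)) = false
      rw [ih hnd']
      rw [List.any_eq_false]
      intro q hq he
      exact hnotin ((beq_iff_eq.mp he) ▸ List.mem_map_of_mem hq)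
    rw [PySem.Dict.items_insert_of_not_contains _ _ hc, ih hnd']

-- B's nested folds produce exactly its (source, kept-variant) pair list
lemma pvB_fold (vsets : List (String × List String))
    (init : PySem.Dict String String) :
    vsets.foldl (fun res p =>
        let others := vsets.foldl (fun o q => if q.1 ≠ p.1 then PySem.Set.update o q.2 else o)
          (PySem.Set.empty : PySem.Set String)
        p.2.foldl (fun res v =>
          if !(PySem.Set.contains others v) then res.insert v p.1 else res) res) init
    = (vsets.flatMap (fun p =>
        ((p.2.filter (fun v => !(PySem.Set.contains
            (vsets.foldl (fun o q => if q.1 ≠ p.1 then PySem.Set.update o q.2 else o)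
              (PySem.Set.empty : PySem.Set String)) v))).map
          (fun v => (v, p.1))))).foldl (fun r q => r.insert q.1 q.2) init := by
  rw [pv_foldl_flatMap]
  congr 1
  funext acc p
  show p.2.foldl (fun res v =>
      if !(PySem.Set.contains (vsets.foldl (fun o q => if q.1 ≠ p.1 then PySem.Set.update o q.2 else o)
        (PySem.Set.empty : PySem.Set String)) v) then res.insert v p.1 else res) acc = _
  rw [pv_foldl_if_filter, List.foldl_map]

-- B equals the canonical staged form
lemma pvB_eq_C (index_list extend_list : List String) (l : Int) :
    index_extend_alt index_list extend_list l = pvC index_list extend_list l := by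
  simp only [index_extend_alt]
  rw [pvB_fold]
  set D := PySem.Set.ofList index_list with hD
  set vsets := (PySem.List.dedup index_list).map (fun s => (s, pvVariantsB extend_list l s)) with hv
  have hDdedup : PySem.List.dedup index_list = D := by
    rw [hD]; simp
  -- the flatMap pair list equals pvC
  have hlist : (vsets.flatMap (fun p =>
        ((p.2.filter (fun v => !(PySem.Set.contains
            (vsets.foldl (fun o q => if q.1 ≠ p.1 then PySem.Set.update o q.2 else o)
              (PySem.Set.empty : PySem.Set String)) v))).map
          (fun v => (v, p.1))))) = pvC index_list extend_list l := by
    rw [hv, hDdedup, List.flatMap_map]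
    unfold pvC
    apply List.flatMap_congr ?_
    intro s hs
    have hsil : s ∈ index_list := (PySem.Set.mem_ofList _ _).mp hs
    simp only [pv_variantsB_eq]
    congr 1
    apply List.filter_congr
    intro v hv'
    have hvg : v ∈ pvRawVar extend_list l s := (PySem.Set.mem_ofList _ _).mp hv'
    -- the survival test equals pvP
    have hmo : (v ∈ (D.map (fun t => (t, PySem.Set.ofList (pvRawVar extend_list l t)))).foldl
          (fun o q => if q.1 ≠ s then PySem.Set.update o q.2 else o)
          (PySem.Set.empty : PySem.Set String))
        ↔ ∃ t ∈ D, t ≠ s ∧ v ∈ pvRawVar extend_list l t := by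
      rw [pv_mem_others]
      simp only [PySem.Set.empty, List.not_mem_nil, false_or]
      constructor
      · rintro ⟨q, hq, h1, h2⟩
        obtain ⟨t, ht, he⟩ := List.mem_map.mp hq
        refine ⟨t, ht, ?_, ?_⟩
        · intro hts; apply h1; rw [← he, hts]
        · rw [← he] at h2
          exact (PySem.Set.mem_ofList _ _).mp h2
      · rintro ⟨t, ht, h1, h2⟩
        exact ⟨(t, PySem.Set.ofList (pvRawVar extend_list l t)), List.mem_map_of_mem ht,
          by simpa using h1, (PySem.Set.mem_ofList _ _).mpr h2⟩
    by_cases hP : pvP index_list extend_list l v = true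
    · rw [hP]
      have hsing := pv_surv_singleton index_list extend_list l v s hsil hvg hP
      have hno : ¬ ∃ t ∈ D, t ≠ s ∧ v ∈ pvRawVar extend_list l t := by
        rintro ⟨t, ht, h1, h2⟩
        have := pv_sset_mem index_list extend_list l v t ((PySem.Set.mem_ofList _ _).mp ht) h2
        rw [hsing] at this
        simp at this
        exact h1 this
      rw [Bool.not_eq_true']
      exact Bool.eq_false_iff.mpr (fun hc => hno (hmo.mp ((PySem.Set.contains_iff _ _).mp hc)))
    · have hPf : pvP index_list extend_list l v = false := by simpa using hP
      rw [hPf]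
      have hlen1 : (pvSSet (pvPairs index_list extend_list l) v).length ≠ 1 := by
        simpa [pvP] using hPf
      have hsm := pv_sset_mem index_list extend_list l v s hsil hvg
      have hex : ∃ t ∈ D, t ≠ s ∧ v ∈ pvRawVar extend_list l t := by
        by_contra hno
        have hno' : ∀ t ∈ D, t ≠ s → v ∉ pvRawVar extend_list l t := by
          intro t ht hts hvt
          exact hno ⟨t, ht, hts, hvt⟩
        have hall : ∀ t ∈ pvSSet (pvPairs index_list extend_list l) v, t = s := by
          intro t ht
          rw [pv_sset_closed] at ht
          rw [PySem.Set.mem_ofList, List.mem_filter] at ht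
          by_contra hts
          exact absurd ((List.contains_iff_mem).mp ht.2)
            (hno' t (by rw [hD]; exact (PySem.Set.mem_ofList _ _).mpr ht.1) hts)
        have := pv_all_eq_singleton _ s (pv_sset_nodup index_list extend_list l v) hsm hall
        rw [this] at hlen1
        simp at hlen1
      rw [Bool.not_eq_false']
      exact (PySem.Set.contains_iff _ _).mpr (hmo.mpr hex)
  rw [hlist]
  apply pv_items_foldl_insert
  -- the kept keys are globally distinct
  unfold pvC
  rw [pv_map_flatMap]
  rw [List.nodup_flatMap]
  constructor
  · intro s hs
    rw [List.map_map]
    rw [show ((fun (q : String × String) => q.1) ∘ fun v => (v, s)) = id from rfl, List.map_id]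
    exact List.Nodup.filter _ (PySem.Set.nodup_ofList _)
  · have hnd : (PySem.Set.ofList index_list).Nodup := PySem.Set.nodup_ofList _
    apply List.Pairwise.imp_of_mem ?_ hnd
    intro x y hxm hym hxy
    rw [Function.onFun, List.disjoint_left]
    intro q hqx hqy
    rw [List.map_map] at hqx hqy
    obtain ⟨vx, hvx, hex⟩ := List.mem_map.mp hqx
    obtain ⟨vy, hvy, hey⟩ := List.mem_map.mp hqy
    rw [List.mem_filter] at hvx hvy
    have hvxy : vx = vy := hex.trans hey.symm
    have hxil : x ∈ index_list := (PySem.Set.mem_ofList _ _).mp hxm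
    have hyil : y ∈ index_list := (PySem.Set.mem_ofList _ _).mp hym
    have hgx : vx ∈ pvRawVar extend_list l x := (PySem.Set.mem_ofList _ _).mp hvx.1
    have hgy : vx ∈ pvRawVar extend_list l y := by
      rw [hvxy]; exact (PySem.Set.mem_ofList _ _).mp hvy.1
    have := pv_not_surv index_list extend_list l vx x y hxil hyil hxy hgx hgy
    rw [this] at hvx
    exact absurd hvx.2 (by simp)

-- ===== VERDICT (by name: the statement is the Claim_ definition above) =====
theorem index_extend_spec : Claim_equal_index_extend := by
  intro index_list extend_list l _
  unfold Spec_index_extend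
  rw [pvA_eq_C, pvB_eq_C]
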